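-- pv_equiv track=rewrite | github.com/SHolic/Address-Auto-Fill | addr_auto_fill.py | __filter_contain
-- ===== SOURCE A (Python) =====
-- def __filter_contain(candidates, addrs):
--     # 检查输入地址addr有多少在候选名单candidates中没有出现的
--     # 输出没有出现次数最小的candidates
--     if len(candidates) == 0:
--         return list()
--     ret_candidates = {t: list() for t in range(len(addrs) + 1)}
--     for candidate in candidates:
--         joint_candidate = ",".join([c for c in candidate if c != ""])
--         error_list = [0 if joint_candidate.find(a) > -1 else 1 for a in addrs]
--         ret_candidates[sum(error_list)].append(candidate)
--     for t in range(len(addrs) + 1):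
--         if len(ret_candidates[t]) > 0:
--             return ret_candidates[t]
--     return list()
-- ===== SOURCE B (Python) =====
-- def __filter_contain(candidates, addrs):
--     best = len(addrs) + 1
--     result = []
--     for candidate in candidates:
--         joint = ",".join([c for c in candidate if c != ""])
--         error = sum(1 for a in addrs if joint.find(a) == -1)
--         if error < best:
--             best = error
--             result = [candidate]
--         elif error == best:
--             result.append(candidate)
--     return result
-- ===== Notes on version B (the rewrite author's own statement) =====
-- stated objective: simpler
-- what changed: Replaced the histogram dict of error buckets plus a second range scan for the first nonempty bucket with a single online pass that tracks the minimum error and the list of candidates achieving it.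
import Mathlib
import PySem

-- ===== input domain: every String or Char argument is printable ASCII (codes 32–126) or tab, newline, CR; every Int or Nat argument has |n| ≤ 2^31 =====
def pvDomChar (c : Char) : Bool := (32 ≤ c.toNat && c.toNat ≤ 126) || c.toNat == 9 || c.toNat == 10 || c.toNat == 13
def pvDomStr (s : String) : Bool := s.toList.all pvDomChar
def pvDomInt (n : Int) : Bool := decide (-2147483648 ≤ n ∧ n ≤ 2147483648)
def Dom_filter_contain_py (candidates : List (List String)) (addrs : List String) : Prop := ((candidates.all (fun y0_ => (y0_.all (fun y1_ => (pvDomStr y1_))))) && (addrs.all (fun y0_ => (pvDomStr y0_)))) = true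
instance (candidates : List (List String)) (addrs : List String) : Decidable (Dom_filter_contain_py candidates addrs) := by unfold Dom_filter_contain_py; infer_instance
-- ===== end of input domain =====

-- B replaces A's histogram-of-buckets dict plus range scan by a single online pass tracking the minimum error (simpler; return value only, no mutation).

-- ===== PORT A =====
-- A's second loop: scan the range of error counts, return the first nonempty bucket.
def pvFirstNonemptyA (d : PySem.Dict Int (List (List String))) : List Int → List (List String)
  | [] => []
  | t :: rest =>
      if (d.getD t []).length > 0 then d.getD t [] else pvFirstNonemptyA d rest

def filter_contain_py (candidates : List (List String)) (addrs : List String) : List (List String) :=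
  if candidates.length = 0 then []
  else
    let ret0 : PySem.Dict Int (List (List String)) :=
      (PySem.List.pyRange 0 ((addrs.length : Int) + 1) 1).foldl
        (fun d t => d.insert t []) PySem.Dict.empty
    let ret := candidates.foldl (fun d candidate =>
      let joint := PySem.Str.join "," (candidate.filter (fun c => c ≠ ""))
      let errorList := addrs.map (fun a => if PySem.Str.find joint a > -1 then (0 : Int) else 1)
      d.modify errorList.sum [] (fun l => l ++ [candidate])) ret0
    pvFirstNonemptyA ret (PySem.List.pyRange 0 ((addrs.length : Int) + 1) 1)

-- ===== PORT B =====
def filter_contain_py_alt (candidates : List (List String)) (addrs : List String) : List (List String) :=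
  (candidates.foldl (fun (st : Int × List (List String)) candidate =>
      let joint := PySem.Str.join "," (candidate.filter (fun c => c ≠ ""))
      let error : Int := (addrs.filter (fun a => PySem.Str.find joint a = -1)).length
      if error < st.1 then (error, [candidate])
      else if error = st.1 then (st.1, st.2 ++ [candidate])
      else st) ((addrs.length : Int) + 1, [])).2

-- ===== PRECONDITION & SPEC =====
def Spec_filter_contain_py (candidates : List (List String)) (addrs : List String) (out : List (List String)) : Prop := out = filter_contain_py_alt candidates addrs
instance (candidates : List (List String)) (addrs : List String) (out : List (List String)) : Decidable (Spec_filter_contain_py candidates addrs out) := by unfold Spec_filter_contain_py; infer_instance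

-- ===== CLAIM (what is proved, stated in full; the proofs are below) =====
def Claim_equal_filter_contain_py : Prop := ∀ (candidates : List (List String)) (addrs : List String), Dom_filter_contain_py candidates addrs → Spec_filter_contain_py candidates addrs (filter_contain_py candidates addrs)

-- ===== LEMMAS AND PROOFS =====

-- the per-candidate error, as B computes it
def pvErr (addrs : List String) (candidate : List String) : Int :=
  ((addrs.filter (fun a =>
      PySem.Str.find (PySem.Str.join "," (candidate.filter (fun c => c ≠ ""))) a = -1)).length : Int)

-- A's 0/1-sum equals B's filter count
theorem pvErrA_eq (addrs : List String) (j : String) :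
    (addrs.map (fun a => if PySem.Str.find j a > -1 then (0 : Int) else 1)).sum
      = ((addrs.filter (fun a => PySem.Str.find j a = -1)).length : Int) := by
  induction addrs with
  | nil => simp
  | cons a rest ih =>
      simp only [PySem.Str.find_eq] at ih ⊢
      have hge : -1 ≤ PySem.Chars.find j.toList a.toList :=
        PySem.Chars.neg_one_le_find _ _
      simp only [List.map_cons, List.sum_cons, List.filter_cons]
      by_cases h : PySem.Chars.find j.toList a.toList = -1
      · simp only [h, decide_true, if_neg (by omega : ¬ (-1:Int) < -1), if_true,
          List.length_cons, ih]
        push_cast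
        ring
      · have hlt : -1 < PySem.Chars.find j.toList a.toList := lt_of_le_of_ne hge (Ne.symm h)
        simp only [h, decide_false, if_pos hlt, ih]
        simp

theorem pvErr_nonneg (addrs : List String) (c : List String) : 0 ≤ pvErr addrs c := by
  unfold pvErr; positivity

theorem pvErr_le (addrs : List String) (c : List String) : pvErr addrs c ≤ (addrs.length : Int) := by
  unfold pvErr
  exact_mod_cast List.length_filter_le _ _

-- running minimum of errors
def pvMin (e : List String → Int) (cs : List (List String)) (m : Int) : Int :=
  cs.foldl (fun acc c => min acc (e c)) m

theorem pvMin_le (e : List String → Int) (cs : List (List String)) (m : Int) :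
    pvMin e cs m ≤ m := by
  induction cs generalizing m with
  | nil => simp [pvMin]
  | cons c rest ih =>
      calc pvMin e (c :: rest) m = pvMin e rest (min m (e c)) := rfl
        _ ≤ min m (e c) := ih _
        _ ≤ m := min_le_left _ _

theorem pvMin_le_all (e : List String → Int) (cs : List (List String)) (m : Int) :
    ∀ c ∈ cs, pvMin e cs m ≤ e c := by
  induction cs generalizing m with
  | nil => intro c hc; simp at hc
  | cons c rest ih =>
      intro x hx
      rcases List.mem_cons.mp hx with rfl | hx
      · calc pvMin e (x :: rest) m = pvMin e rest (min m (e x)) := rfl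
          _ ≤ min m (e x) := pvMin_le _ _ _
          _ ≤ e x := min_le_right _ _
      · exact ih (min m (e c)) x hx

theorem pvMin_attained (e : List String → Int) (cs : List (List String)) (m : Int) :
    pvMin e cs m = m ∨ ∃ c ∈ cs, pvMin e cs m = e c := by
  induction cs generalizing m with
  | nil => exact Or.inl rfl
  | cons c rest ih =>
      have h := ih (min m (e c))
      rcases h with h | ⟨x, hx, hxe⟩
      · rcases min_cases m (e c) with ⟨hm, _⟩ | ⟨hm, _⟩
        · exact Or.inl (by simpa [pvMin, hm] using h)
        · exact Or.inr ⟨c, List.mem_cons_self, by simpa [pvMin, hm] using h⟩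
      · exact Or.inr ⟨x, List.mem_cons_of_mem _ hx, hxe⟩

-- B's fold, characterised
theorem foldB_char (e : List String → Int) (cs : List (List String)) :
    ∀ (m : Int) (l : List (List String)),
      cs.foldl (fun st c =>
        if e c < st.1 then (e c, [c])
        else if e c = st.1 then (st.1, st.2 ++ [c])
        else st) (m, l)
      = (pvMin e cs m,
         (if pvMin e cs m = m then l else []) ++ cs.filter (fun c => e c = pvMin e cs m)) := by
  induction cs with
  | nil => intro m l; simp [pvMin]
  | cons c rest ih =>
      intro m l
      have hstep : pvMin e (c :: rest) m = pvMin e rest (min m (e c)) := rfl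
      rw [hstep]
      by_cases h1 : e c < m
      · have hmin : min m (e c) = e c := min_eq_right h1.le
        have hle : pvMin e rest (e c) ≤ e c := pvMin_le _ _ _
        rw [hmin]
        have hMne : pvMin e rest (e c) ≠ m := by omega
        simp only [List.foldl_cons, if_pos h1, ih (e c) [c]]
        rw [if_neg hMne]
        rcases eq_or_ne (e c) (pvMin e rest (e c)) with h2 | h2
        · rw [if_pos h2.symm]
          have hd : decide (e c = pvMin e rest (e c)) = true := decide_eq_true h2
          simp [hd]
        · rw [if_neg (Ne.symm h2)]
          have hd : decide (e c = pvMin e rest (e c)) = false := decide_eq_false h2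
          simp [hd]
      · rcases eq_or_ne (e c) m with h2 | h2
        · have hmin : min m (e c) = m := by rw [h2]; exact min_self m
          rw [hmin]
          simp only [List.foldl_cons, if_neg h1, if_pos h2, ih m (l ++ [c])]
          rcases eq_or_ne (pvMin e rest m) m with h3 | h3
          · rw [if_pos h3, if_pos h3]
            have hd : decide (e c = pvMin e rest m) = true := decide_eq_true (by omega)
            simp [hd]
          · rw [if_neg h3, if_neg h3]
            have hd : decide (e c = pvMin e rest m) = false := decide_eq_false (by omega)
            simp [hd]
        · have h3 : m < e c := by omega
          have hmin : min m (e c) = m := min_eq_left h3.le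
          rw [hmin]
          simp only [List.foldl_cons, if_neg h1, if_neg h2, ih m l]
          have hle : pvMin e rest m ≤ m := pvMin_le _ _ _
          have hd : decide (e c = pvMin e rest m) = false := decide_eq_false (by omega)
          simp [hd]

theorem B_char (candidates : List (List String)) (addrs : List String) :
    filter_contain_py_alt candidates addrs
      = (if pvMin (pvErr addrs) candidates ((addrs.length : Int) + 1) = (addrs.length : Int) + 1
          then [] else [])
        ++ candidates.filter (fun c =>
            pvErr addrs c = pvMin (pvErr addrs) candidates ((addrs.length : Int) + 1)) := by
  unfold filter_contain_py_alt
  have := foldB_char (pvErr addrs) candidates ((addrs.length : Int) + 1) []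
  rw [show (fun (st : Int × List (List String)) candidate =>
      let joint := PySem.Str.join "," (candidate.filter (fun c => c ≠ ""))
      let error : Int := ((addrs.filter (fun a => PySem.Str.find joint a = -1)).length : Int)
      if error < st.1 then (error, [candidate])
      else if error = st.1 then (st.1, st.2 ++ [candidate])
      else st)
    = (fun (st : Int × List (List String)) c =>
      if pvErr addrs c < st.1 then (pvErr addrs c, [c])
      else if pvErr addrs c = st.1 then (st.1, st.2 ++ [c])
      else st) from rfl]
  rw [this]

-- generic "first nonempty" scan over a pure bucket function
def pvFirstG (g : Int → List (List String)) : List Int → List (List String)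
  | [] => []
  | t :: rest => if (g t).length > 0 then g t else pvFirstG g rest

theorem firstNonemptyA_eq_firstG (d : PySem.Dict Int (List (List String)))
    (g : Int → List (List String)) (ts : List Int)
    (h : ∀ t ∈ ts, d.getD t [] = g t) : pvFirstNonemptyA d ts = pvFirstG g ts := by
  induction ts with
  | nil => rfl
  | cons t rest ih =>
      have ht : d.getD t [] = g t := h t List.mem_cons_self
      simp only [pvFirstNonemptyA, pvFirstG, ht]
      rw [ih (fun x hx => h x (List.mem_cons_of_mem _ hx))]

theorem firstG_scan (g : Int → List (List String)) (M : Int)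
    (hg : ∀ t, t < M → g t = []) (hM : (g M).length > 0) :
    ∀ (k : Nat) (a b : Int), a ≤ M → M < b → (M - a).toNat = k →
      pvFirstG g (PySem.List.pyRange a b 1) = g M := by
  intro k
  induction k with
  | zero =>
      intro a b ha hb hk
      have haM : a = M := by omega
      rw [PySem.List.pyRange_one_cons (by omega : a < b)]
      simp [pvFirstG, haM, hM]
  | succ n ih =>
      intro a b ha hb hk
      have haM : a < M := by omega
      rw [PySem.List.pyRange_one_cons (by omega : a < b)]
      simp only [pvFirstG, hg a haM, List.length_nil]
      exact ih (a + 1) b (by omega) hb (by omega)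

-- the empty starting dict (range of empty buckets) looks up to [] everywhere
theorem getD_insert_nil_fold (ts : List Int) (d : PySem.Dict Int (List (List String)))
    (h : ∀ t, d.getD t [] = []) :
    ∀ t, (ts.foldl (fun d t => d.insert t ([] : List (List String))) d).getD t [] = [] := by
  induction ts generalizing d with
  | nil => exact h
  | cons s rest ih =>
      intro t
      exact ih (d.insert s []) (fun x => by rw [PySem.Dict.getD_insert]; split <;> simp [h]) t

-- the bucket dict looks up to a filter of candidates
theorem A_dict_char (candidates : List (List String)) (addrs : List String) (t : Int) :
    ((candidates.foldl (fun d candidate =>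
        let joint := PySem.Str.join "," (candidate.filter (fun c => c ≠ ""))
        let errorList := addrs.map (fun a => if PySem.Str.find joint a > -1 then (0 : Int) else 1)
        d.modify errorList.sum [] (fun l => l ++ [candidate]))
      ((PySem.List.pyRange 0 ((addrs.length : Int) + 1) 1).foldl
        (fun d t => d.insert t []) PySem.Dict.empty)).getD t [])
      = candidates.filter (fun c => pvErr addrs c = t) := by
  have hstep : (fun (d : PySem.Dict Int (List (List String))) (candidate : List String) =>
      let joint := PySem.Str.join "," (candidate.filter (fun c => c ≠ ""))
      let errorList := addrs.map (fun a => if PySem.Str.find joint a > -1 then (0 : Int) else 1)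
      d.modify errorList.sum [] (fun l => l ++ [candidate]))
      = (fun d c => d.modify (pvErr addrs c) [] (fun l => l ++ [c])) := by
    funext d c
    simp only [pvErrA_eq, pvErr]
  rw [hstep]
  have hmap : candidates.foldl (fun d c => d.modify (pvErr addrs c) [] (fun l => l ++ [c]))
      ((PySem.List.pyRange 0 ((addrs.length : Int) + 1) 1).foldl
        (fun d t => d.insert t []) PySem.Dict.empty)
      = (candidates.map (fun c => (pvErr addrs c, c))).foldl
          (fun d p => d.modify p.1 [] (fun l => l ++ [p.2]))
          ((PySem.List.pyRange 0 ((addrs.length : Int) + 1) 1).foldl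
            (fun d t => d.insert t []) PySem.Dict.empty) := by
    rw [List.foldl_map]
  rw [hmap, PySem.Dict.getD_foldl_modify_append]
  rw [getD_insert_nil_fold _ _ (fun t => PySem.Dict.getD_empty t []) t]
  simp only [List.nil_append, List.filter_map, List.map_map, Function.comp_def]
  simp only [List.map_id_fun', id]
  have : (fun (c : List String) => pvErr addrs c == t) = (fun c => decide (pvErr addrs c = t)) := by
    funext c; by_cases h : pvErr addrs c = t <;> simp [h]
  simp [this]

-- ===== VERDICT (by name: the statement is the Claim_ definition above) =====
theorem filter_contain_py_spec : Claim_equal_filter_contain_py := by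
  intro candidates addrs _
  unfold Spec_filter_contain_py
  by_cases hnil : candidates = []
  · subst hnil
    rfl
  · set n : Int := (addrs.length : Int) with hn
    set M : Int := pvMin (pvErr addrs) candidates (n + 1) with hM
    have hMle : ∀ c ∈ candidates, M ≤ pvErr addrs c := pvMin_le_all _ _ _
    have hMlt : M < n + 1 := by
      obtain ⟨c, hc⟩ := List.exists_mem_of_ne_nil candidates hnil
      have h1 := hMle c hc
      have h2 := pvErr_le addrs c
      omega
    have hatt : ∃ c ∈ candidates, pvErr addrs c = M := by
      rcases pvMin_attained (pvErr addrs) candidates (n + 1) with h | ⟨c, hc, hce⟩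
      · exact absurd (hM.trans h) (by omega)
      · exact ⟨c, hc, hce.symm⟩
    -- B side
    rw [B_char, if_neg (by omega : ¬ M = n + 1), List.nil_append]
    -- A side
    unfold filter_contain_py
    rw [if_neg (by simpa [List.length_eq_zero_iff] using hnil)]
    rw [firstNonemptyA_eq_firstG _
        (fun t => candidates.filter (fun c => pvErr addrs c = t)) _
        (fun t _ => A_dict_char candidates addrs t)]
    have h0M : 0 ≤ M := by
      obtain ⟨c, hc, hce⟩ := hatt
      have := pvErr_nonneg addrs c
      omega
    refine firstG_scan _ M ?_ ?_ (M - 0).toNat 0 (n + 1) h0M hMlt rfl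
    · intro t ht
      rw [List.filter_eq_nil_iff]
      intro c hc
      have := hMle c hc
      simp only [decide_eq_true_eq]
      omega
    · obtain ⟨c, hc, hce⟩ := hatt
      have : c ∈ candidates.filter (fun c => pvErr addrs c = M) :=
        List.mem_filter.mpr ⟨hc, by simp [hce]⟩
      have hne : candidates.filter (fun c => pvErr addrs c = M) ≠ [] :=
        fun h => by rw [h] at this; simp at this
      exact List.length_pos_of_ne_nil hne
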